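-- pv_equiv track=rewrite | github.com/srijal30/genuine-djinn | server/obscuring/obscure.py | owoify
-- ===== SOURCE A (Python) =====
-- def owoify(message: str) -> str:
--     """Make message cuter."""
--     owoified_message = "".join(
--         "w" if char in ["l", "r"] else char for char in message.lower()
--     )
--     owoified_message = " ".join(
--         "haz"
--         if word in ["has", "have"]
--         else "uu"
--         if word == "you"
--         else "da"
--         if word == "the"
--         else word
--         for word in owoified_message.split()
--     )
--     return owoified_message + " UwU"
-- ===== SOURCE B (Python) =====
-- def owoify(message: str) -> str:
--     """Make message cuter (single char-level tokenizer pass, no split/replace passes)."""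
--     words = []
--     buf = []
--     for ch in message + " ":  # sentinel space flushes the last word
--         c = ch.lower()
--         if c in " \t\n\x0b\x0c\r":
--             if buf:
--                 w = "".join(buf)
--                 if w in ("has", "have"):
--                     w = "haz"
--                 elif w == "you":
--                     w = "uu"
--                 elif w == "the":
--                     w = "da"
--                 words.append(w)
--                 buf = []
--         else:
--             buf.append("w" if c in "lr" else c)
--     return " ".join(words) + " UwU"
-- ===== Notes on version B (the rewrite author's own statement) =====
-- stated objective: alternative
-- what changed: B replaces A's staged full-string passes (char-replace comprehension, then split() and a word-mapping comprehension joined back) with a single character-level tokenizer state machine: one loop over the characters that lowercases, substitutes l/r, detects word boundaries itself and flushes each finished word through the word substitutions.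
import Mathlib
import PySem

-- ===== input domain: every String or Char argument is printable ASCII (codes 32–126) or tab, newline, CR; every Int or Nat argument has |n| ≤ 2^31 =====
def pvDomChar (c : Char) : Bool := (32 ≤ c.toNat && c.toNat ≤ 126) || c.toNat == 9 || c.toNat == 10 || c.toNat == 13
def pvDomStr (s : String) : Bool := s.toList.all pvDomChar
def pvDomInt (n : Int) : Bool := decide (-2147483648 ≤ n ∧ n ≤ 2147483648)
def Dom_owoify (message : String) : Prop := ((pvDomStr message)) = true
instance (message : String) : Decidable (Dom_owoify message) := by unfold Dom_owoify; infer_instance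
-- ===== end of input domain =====

-- B replaces A's staged full-string passes (char replace, then split + word map + join)
-- with a single character-level tokenizer state machine; objective: alternative.

-- ===== PORT A =====
-- A, pass 1: "".join("w" if char in ["l","r"] else char for char in message.lower())
-- A, pass 2: " ".join(<word substitution> for word in owoified_message.split()),  + " UwU"
def owoify (message : String) : String :=
  let owoified1 : List Char :=
    PySem.Chars.join []
      ((PySem.Chars.lower message.toList).map
        (fun c => if c ∈ ['l', 'r'] then ['w'] else [c]))
  let owoified2 : List Char :=
    PySem.Chars.join [' ']
      ((PySem.Chars.split₀ owoified1).map
        (fun w =>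
          if w ∈ [['h','a','s'], ['h','a','v','e']] then ['h','a','z']
          else if w = ['y','o','u'] then ['u','u']
          else if w = ['t','h','e'] then ['d','a']
          else w))
  String.ofList (owoified2 ++ [' ', 'U', 'w', 'U'])

-- ===== PORT B =====
-- B: one loop over the chars of message + " " (sentinel space); state = (words, buf);
-- per char: lowercase, on whitespace flush buf through the word substitution, else
-- append the l/r→w substituted char to buf; finally " ".join(words) + " UwU".
def owoify_alt (message : String) : String :=
  let st : List (List Char) × List Char :=
    (message.toList ++ [' ']).foldl
      (fun (st : List (List Char) × List Char) ch =>
        let c := PySem.Chars.lowerChar ch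
        if c ∈ [' ', '\t', '\n', '\x0b', '\x0c', '\r'] then
          if st.2.isEmpty then st
          else
            let w := st.2
            let w := if w ∈ [['h','a','s'], ['h','a','v','e']] then ['h','a','z']
                     else if w = ['y','o','u'] then ['u','u']
                     else if w = ['t','h','e'] then ['d','a']
                     else w
            (st.1 ++ [w], [])
        else (st.1, st.2 ++ [if c ∈ ['l', 'r'] then 'w' else c]))
      ([], [])
  String.ofList (PySem.Chars.join [' '] st.1 ++ [' ', 'U', 'w', 'U'])

-- ===== PRECONDITION & SPEC =====
def Spec_owoify (message : String) (out : String) : Prop := out = owoify_alt message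
instance (message : String) (out : String) : Decidable (Spec_owoify message out) := by unfold Spec_owoify; infer_instance

-- ===== CLAIM =====
def Claim_equal_owoify : Prop := ∀ (message : String), Dom_owoify message → Spec_owoify message (owoify message)

-- ===== LEMMAS AND PROOFS =====

-- the char substitution of both programs, as a Char → Char map
def owoChar (c : Char) : Char := if c ∈ ['l', 'r'] then 'w' else c

-- the word substitution chain of both programs
def owoSubst (w : List Char) : List Char :=
  if w ∈ [['h','a','s'], ['h','a','v','e']] then ['h','a','z']
  else if w = ['y','o','u'] then ['u','u']
  else if w = ['t','h','e'] then ['d','a']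
  else w

-- the whitespace set B tests against
def wsList : List Char := [' ', '\t', '\n', '\x0b', '\x0c', '\r']

-- B's loop body with the char transformation factored out
def stepB (st : List (List Char) × List Char) (c : Char) : List (List Char) × List Char :=
  if c ∈ wsList then
    if st.2.isEmpty then st else (st.1 ++ [owoSubst st.2], [])
  else (st.1, st.2 ++ [c])

theorem map_singleton_owoChar (l : List Char) :
    l.map (fun c => if c ∈ ['l', 'r'] then ['w'] else [c]) = (l.map owoChar).map ([·]) := by
  rw [List.map_map]
  exact List.map_congr_left (fun c _ => by
    unfold owoChar; by_cases hl : c = 'l' <;> by_cases hr : c = 'r' <;> simp [hl, hr])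

theorem join_owo (l : List Char) :
    PySem.Chars.join [] (l.map (fun c => if c ∈ ['l', 'r'] then ['w'] else [c])) = l.map owoChar := by
  rw [map_singleton_owoChar]
  exact PySem.Chars.join_nil_singletons _

-- owoChar never maps into or out of the whitespace set
theorem mem_ws_owo (c : Char) :
    ((owoChar c) ∈ [' ', '\t', '\n', '\x0b', '\x0c', '\r']) = (c ∈ [' ', '\t', '\n', '\x0b', '\x0c', '\r']) := by
  unfold owoChar
  by_cases hl : c = 'l'
  · subst hl; decide
  by_cases hr : c = 'r'
  · subst hr; decide
  simp [hl, hr]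

-- B's loop body equals stepB applied to the transformed char
theorem step_eq (st : List (List Char) × List Char) (ch : Char) :
    (let c := PySem.Chars.lowerChar ch
     if c ∈ [' ', '\t', '\n', '\x0b', '\x0c', '\r'] then
       if st.2.isEmpty then st
       else
         let w := st.2
         let w := if w ∈ [['h','a','s'], ['h','a','v','e']] then ['h','a','z']
                  else if w = ['y','o','u'] then ['u','u']
                  else if w = ['t','h','e'] then ['d','a']
                  else w
         (st.1 ++ [w], [])
     else (st.1, st.2 ++ [if c ∈ ['l', 'r'] then 'w' else c]))
    = stepB st (owoChar (PySem.Chars.lowerChar ch)) := by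
  simp only [stepB, wsList, owoSubst]
  simp only [mem_ws_owo]
  simp only [owoChar]

-- split₀.go accumulator lemma
theorem go_acc (s : List Char) (cur : List Char) (acc : List (List Char)) :
    PySem.Chars.split₀.go s cur acc = acc.reverse ++ PySem.Chars.split₀.go s cur [] := by
  induction s generalizing cur acc with
  | nil =>
      by_cases h : cur.isEmpty <;> simp [PySem.Chars.split₀.go, h]
  | cons c rest ih =>
      simp only [PySem.Chars.split₀.go]
      by_cases hs : PySem.Chars.isspace c
      · by_cases h : cur.isEmpty
        · simp only [hs, h, if_true]
          exact ih [] acc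
        · simp only [hs, h, if_true]
          rw [ih [] (cur.reverse :: acc), ih [] [cur.reverse]]
          simp
      · simp only [hs]
        exact ih (c :: cur) acc

-- the machine invariant: B's tokenizer over u ++ [' '] produces the substituted words of split₀ u
theorem mach (u : List Char) (ws : List (List Char)) (cur : List Char)
    (h : ∀ c ∈ u, (c ∈ wsList) = (PySem.Chars.isspace c = true)) :
    ((u ++ [' ']).foldl stepB (ws, cur)).1
      = ws ++ (PySem.Chars.split₀.go u cur.reverse []).map owoSubst := by
  induction u generalizing ws cur with
  | nil =>
      by_cases hcur : cur.isEmpty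
      · have hn : cur = [] := by simpa [List.isEmpty_iff] using hcur
        subst hn
        simp [stepB, PySem.Chars.split₀.go, wsList]
      · have hcur' : cur.reverse.isEmpty = false := by simp_all [List.isEmpty_iff]
        simp [stepB, PySem.Chars.split₀.go, wsList, hcur, hcur']
  | cons c rest ih =>
      have hc := h c (by simp)
      have hrest : ∀ c ∈ rest, (c ∈ wsList) = (PySem.Chars.isspace c = true) :=
        fun d hd => h d (by simp [hd])
      simp only [List.cons_append, List.foldl_cons]
      by_cases hs : PySem.Chars.isspace c
      · have hmem : c ∈ wsList := by rw [hc]; exact hs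
        by_cases hcur : cur.isEmpty
        · have hn : cur = [] := by simpa [List.isEmpty_iff] using hcur
          subst hn
          have hstep : stepB (ws, ([] : List Char)) c = (ws, []) := by simp [stepB, hmem]
          rw [hstep, ih ws [] hrest]
          simp [PySem.Chars.split₀.go, hs]
        · have hcur' : cur.reverse.isEmpty = false := by simp_all [List.isEmpty_iff]
          have hstep : stepB (ws, cur) c = (ws ++ [owoSubst cur], []) := by
            simp [stepB, hmem, hcur]
          have hgo : PySem.Chars.split₀.go (c :: rest) cur.reverse []
              = PySem.Chars.split₀.go rest [] [cur.reverse.reverse] := by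
            simp [PySem.Chars.split₀.go, hs, hcur']
          rw [hstep, ih (ws ++ [owoSubst cur]) [] hrest, hgo,
            go_acc rest [] [cur.reverse.reverse]]
          simp
      · have hmem : ¬ (c ∈ wsList) := by rw [hc]; exact hs
        have hstep : stepB (ws, cur) c = (ws, cur ++ [c]) := by simp [stepB, hmem]
        have hgo : PySem.Chars.split₀.go (c :: rest) cur.reverse []
            = PySem.Chars.split₀.go rest (c :: cur.reverse) [] := by
          simp [PySem.Chars.split₀.go, hs]
        rw [hstep, hgo]
        have := ih ws (cur ++ [c]) hrest
        simpa using this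

-- domain facts
theorem dom_lowerChar (c : Char) (h : pvDomChar c = true) :
    pvDomChar (PySem.Chars.lowerChar c) = true := by
  unfold PySem.Chars.lowerChar
  by_cases hu : PySem.Chars.isupper c = true
  · have hu' : 65 ≤ c.toNat ∧ c.toNat ≤ 90 := by
      simpa [PySem.Chars.isupper] using hu
    have hv : Nat.isValidChar (c.toNat + 32) := Or.inl (by omega)
    simp only [hu, if_true, pvDomChar, Char.toNat_ofNat, if_pos hv]
    simp; omega
  · simp [hu, h]

theorem dom_owoChar (c : Char) (h : pvDomChar c = true) :
    pvDomChar (owoChar c) = true := by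
  unfold owoChar
  by_cases hl : c = 'l'; · subst hl; decide
  by_cases hr : c = 'r'; · subst hr; decide
  simp [hl, hr, h]

theorem ws_iff (c : Char) (h : pvDomChar c = true) :
    (c ∈ wsList) = (PySem.Chars.isspace c = true) := by
  simp [pvDomChar] at h
  simp only [wsList, List.mem_cons, List.not_mem_nil, or_false, eq_iff_iff]
  have key : ∀ n : Nat, c.toNat = n → c = Char.ofNat n := fun n hn =>
    (Char.ofNat_toNat c).symm.trans (congrArg Char.ofNat hn)
  constructor
  · rintro (rfl|rfl|rfl|rfl|rfl|rfl) <;> decide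
  · intro hs
    simp [PySem.Chars.isspace] at hs
    have h4 : c.toNat = 32 ∨ c.toNat = 9 ∨ c.toNat = 10 ∨ c.toNat = 13 := by omega
    rcases h4 with h1|h1|h1|h1
    · exact Or.inl ((key 32 h1).trans (by decide))
    · exact Or.inr (Or.inl ((key 9 h1).trans (by decide)))
    · exact Or.inr (Or.inr (Or.inl ((key 10 h1).trans (by decide))))
    · exact Or.inr (Or.inr (Or.inr (Or.inr (Or.inr ((key 13 h1).trans (by decide))))))

-- ===== VERDICT =====
theorem owoify_spec : Claim_equal_owoify := by
  intro message hdom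
  have hdom' : ∀ c ∈ message.toList, pvDomChar c = true := by
    simpa [Dom_owoify, pvDomStr, List.all_eq_true] using hdom
  have hall : ∀ c ∈ message.toList.map (fun ch => owoChar (PySem.Chars.lowerChar ch)),
      (c ∈ wsList) = (PySem.Chars.isspace c = true) := by
    intro c hc
    obtain ⟨d, hd, rfl⟩ := List.mem_map.mp hc
    exact ws_iff _ (dom_owoChar _ (dom_lowerChar _ (hdom' d hd)))
  have hstep : (fun (st : List (List Char) × List Char) ch =>
        let c := PySem.Chars.lowerChar ch
        if c ∈ [' ', '\t', '\n', '\x0b', '\x0c', '\r'] then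
          if st.2.isEmpty then st
          else
            let w := st.2
            let w := if w ∈ [['h','a','s'], ['h','a','v','e']] then ['h','a','z']
                     else if w = ['y','o','u'] then ['u','u']
                     else if w = ['t','h','e'] then ['d','a']
                     else w
            (st.1 ++ [w], [])
        else (st.1, st.2 ++ [if c ∈ ['l', 'r'] then 'w' else c]))
      = fun st ch => stepB st (owoChar (PySem.Chars.lowerChar ch)) :=
    funext fun st => funext fun ch => step_eq st ch
  have hchain : (fun w : List Char =>
      if w ∈ [['h','a','s'], ['h','a','v','e']] then ['h','a','z']
      else if w = ['y','o','u'] then ['u','u']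
      else if w = ['t','h','e'] then ['d','a']
      else w) = owoSubst := rfl
  have hsent : (fun ch => owoChar (PySem.Chars.lowerChar ch)) ' ' = ' ' := by decide
  simp only [Spec_owoify, owoify, owoify_alt, join_owo, hchain, hstep]
  rw [← List.foldl_map, List.map_append]
  simp only [List.map_cons, List.map_nil, hsent]
  rw [mach _ [] [] hall]
  simp [PySem.Chars.split₀, PySem.Chars.lower, List.map_map, Function.comp_def]
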